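-- pv_equiv track=rewrite | github.com/CsongorMatyas/RayBasisSet | OURelemen.py | GetElemCorVal
-- ===== SOURCE A (Python) =====
-- def GetElemGrPe(z):
--     ElemOrd=[2,8,8,18,18,36,36]
--     period=1
--     group=0
--     for eleord in ElemOrd:
--         if group < z-eleord:
--             group+=eleord
--             period+=1
--     group=z-group
--     return group,period
--
-- def GetElemCorVal(z):
--     ElemAto=[['1S'],['2S','2P'],['3S','3P'],['4S','3D','4P'],['5S','4D','5P'],['6S','4F','5D','6P'],['7S','5F','6D','7P']]
--     g,p=GetElemGrPe(z)
--     AtomicCore=[]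
--     for sto in range(0,p-1):
--         for psto in ElemAto[sto]:
--             AtomicCore.append(psto)
--     AtomicValance=[]
--     for vsto in ElemAto[p-1]:
--         AtomicValance.append(vsto)
--     return AtomicCore,AtomicValance
-- ===== SOURCE B (Python) =====
-- def GetElemCorVal(z):
--     ElemAto = [['1S'], ['2S', '2P'], ['3S', '3P'], ['4S', '3D', '4P'],
--                ['5S', '4D', '5P'], ['6S', '4F', '5D', '6P'], ['7S', '5F', '6D', '7P']]
--     # cumulative electron capacities of periods 1..7
--     cum = [2, 10, 18, 36, 54, 90, 126]
--     # binary search: first index with cum[i] >= z; the period is that index + 1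
--     lo, hi = 0, len(cum)
--     while lo < hi:
--         mid = (lo + hi) // 2
--         if cum[mid] < z:
--             lo = mid + 1
--         else:
--             hi = mid
--     p = lo + 1
--     core = [sub for shell in ElemAto[:p - 1] for sub in shell]
--     return core, list(ElemAto[p - 1])
-- ===== Notes on version B (the rewrite author's own statement) =====
-- stated objective: alternative
-- what changed: Replaces GetElemGrPe's mutating accumulate-and-compare scan with a binary search over a precomputed cumulative-capacity table, and builds core/valence by slicing and flattening the subshell table instead of nested index-driven append loops.
import Mathlib
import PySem

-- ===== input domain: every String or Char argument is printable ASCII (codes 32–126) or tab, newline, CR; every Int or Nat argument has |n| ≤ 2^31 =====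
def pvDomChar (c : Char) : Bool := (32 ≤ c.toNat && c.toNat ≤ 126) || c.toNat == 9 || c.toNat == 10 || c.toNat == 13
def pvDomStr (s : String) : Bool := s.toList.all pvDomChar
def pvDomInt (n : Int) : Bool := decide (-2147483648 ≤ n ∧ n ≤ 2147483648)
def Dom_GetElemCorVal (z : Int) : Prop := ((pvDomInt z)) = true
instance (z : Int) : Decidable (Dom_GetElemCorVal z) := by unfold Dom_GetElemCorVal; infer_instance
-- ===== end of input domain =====

-- B replaces A's mutating accumulate-and-compare period scan by a binary search over a
-- precomputed cumulative-capacity table and builds core/valence by slicing + flattening (objective: alternative).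

-- ===== PORT A =====
-- loop body of GetElemGrPe's for-loop: state (group, period)
def pvStep (z : Int) (s : Int × Int) (eleord : Int) : Int × Int :=
  if s.1 < z - eleord then (s.1 + eleord, s.2 + 1) else s

-- helper GetElemGrPe, transliterated
def pvGetElemGrPe (z : Int) : Int × Int :=
  let ElemOrd : List Int := [2, 8, 8, 18, 18, 36, 36]
  let gp := ElemOrd.foldl (pvStep z) (0, 1)
  (z - gp.1, gp.2)

def pvElemAto : List (List String) :=
  [["1S"], ["2S","2P"], ["3S","3P"], ["4S","3D","4P"], ["5S","4D","5P"],
   ["6S","4F","5D","6P"], ["7S","5F","6D","7P"]]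

def GetElemCorVal (z : Int) : List String × List String :=
  let p := (pvGetElemGrPe z).2
  -- for sto in range(0, p-1): for psto in ElemAto[sto]: AtomicCore.append(psto)
  let AtomicCore := (PySem.List.pyRange 0 (p - 1) 1).foldl
    (fun acc sto => ((PySem.List.pyGet? pvElemAto sto).getD []).foldl (fun a psto => a ++ [psto]) acc) []
  -- for vsto in ElemAto[p-1]: AtomicValance.append(vsto)   (ElemAto[7] raises for p = 8: outside Pre_)
  let AtomicValance := ((PySem.List.pyGet? pvElemAto (p - 1)).getD []).foldl (fun a vsto => a ++ [vsto]) []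
  (AtomicCore, AtomicValance)

-- ===== PORT B =====
def pvCum : List Int := [2, 10, 18, 36, 54, 90, 126]

-- the while-loop of Source B, with fuel (hi - lo shrinks each iteration, so len(cum) fuel is enough)
def pvBsLoop (z : Int) : Nat → Nat → Nat → Nat
  | 0, lo, _ => lo
  | fuel + 1, lo, hi =>
    if lo < hi then
      let mid := (lo + hi) / 2
      if (PySem.List.pyGet? pvCum (mid : Int)).getD 0 < z then pvBsLoop z fuel (mid + 1) hi
      else pvBsLoop z fuel lo mid
    else lo

def GetElemCorVal_alt (z : Int) : List String × List String :=
  let p := pvBsLoop z pvCum.length 0 pvCum.length + 1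
  -- core = [sub for shell in ElemAto[:p-1] for sub in shell]
  let core := (PySem.List.slice pvElemAto none (some ((p : Int) - 1))).flatMap (fun shell => shell)
  -- valence = list(ElemAto[p-1])   (ElemAto[7] raises for p = 8: outside Pre_)
  (core, (PySem.List.pyGet? pvElemAto ((p : Int) - 1)).getD [])

-- ===== PRECONDITION & SPEC =====
-- Pre_ excludes z > 126, on which A raises IndexError (ElemAto[7]); B raises there too.
def Pre_GetElemCorVal (z : Int) : Prop := z ≤ 126
instance (z : Int) : Decidable (Pre_GetElemCorVal z) := by unfold Pre_GetElemCorVal; infer_instance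
def pvWitness_GetElemCorVal : Int := 26

def Spec_GetElemCorVal (z : Int) (out : List String × List String) : Prop := out = GetElemCorVal_alt z
instance (z : Int) (out : List String × List String) : Decidable (Spec_GetElemCorVal z out) := by unfold Spec_GetElemCorVal; infer_instance

-- ===== CLAIM (what is proved, stated in full; the proofs are below) =====
def Claim_equal_GetElemCorVal : Prop := ∀ (z : Int), Dom_GetElemCorVal z → Pre_GetElemCorVal z → Spec_GetElemCorVal z (GetElemCorVal z)

-- ===== LEMMAS AND PROOFS =====

theorem step_lt (z g p ord : Int) (h : g < z - ord) : pvStep z (g, p) ord = (g + ord, p + 1) := by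
  simp [pvStep, h]

theorem step_ge (z g p ord : Int) (h : ¬ g < z - ord) : pvStep z (g, p) ord = (g, p) := by
  simp [pvStep, h]

-- A's period, one lemma per interval of z (the loop's conditions are decided by the interval)
theorem gpA1 (z : Int) (h : z ≤ 2) : (pvGetElemGrPe z).2 = 1 := by
  simp only [pvGetElemGrPe, List.foldl_cons, List.foldl_nil]
  rw [step_ge z 0 1 2 (by omega), step_ge z 0 1 8 (by omega), step_ge z 0 1 8 (by omega),
      step_ge z 0 1 18 (by omega), step_ge z 0 1 18 (by omega), step_ge z 0 1 36 (by omega),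
      step_ge z 0 1 36 (by omega)]

theorem gpA2 (z : Int) (h1 : 2 < z) (h2 : z ≤ 10) : (pvGetElemGrPe z).2 = 2 := by
  simp only [pvGetElemGrPe, List.foldl_cons, List.foldl_nil]
  rw [step_lt z 0 1 2 (by omega), step_ge z (0+2) (1+1) 8 (by omega),
      step_ge z (0+2) (1+1) 8 (by omega), step_ge z (0+2) (1+1) 18 (by omega),
      step_ge z (0+2) (1+1) 18 (by omega), step_ge z (0+2) (1+1) 36 (by omega),
      step_ge z (0+2) (1+1) 36 (by omega)]
  norm_num

theorem gpA3 (z : Int) (h1 : 10 < z) (h2 : z ≤ 18) : (pvGetElemGrPe z).2 = 3 := by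
  simp only [pvGetElemGrPe, List.foldl_cons, List.foldl_nil]
  rw [step_lt z 0 1 2 (by omega), step_lt z (0+2) (1+1) 8 (by omega),
      step_ge z (0+2+8) (1+1+1) 8 (by omega), step_ge z (0+2+8) (1+1+1) 18 (by omega),
      step_ge z (0+2+8) (1+1+1) 18 (by omega), step_ge z (0+2+8) (1+1+1) 36 (by omega),
      step_ge z (0+2+8) (1+1+1) 36 (by omega)]
  norm_num

theorem gpA4 (z : Int) (h1 : 18 < z) (h2 : z ≤ 36) : (pvGetElemGrPe z).2 = 4 := by
  simp only [pvGetElemGrPe, List.foldl_cons, List.foldl_nil]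
  rw [step_lt z 0 1 2 (by omega), step_lt z (0+2) (1+1) 8 (by omega),
      step_lt z (0+2+8) (1+1+1) 8 (by omega), step_ge z (0+2+8+8) (1+1+1+1) 18 (by omega),
      step_ge z (0+2+8+8) (1+1+1+1) 18 (by omega), step_ge z (0+2+8+8) (1+1+1+1) 36 (by omega),
      step_ge z (0+2+8+8) (1+1+1+1) 36 (by omega)]
  norm_num

theorem gpA5 (z : Int) (h1 : 36 < z) (h2 : z ≤ 54) : (pvGetElemGrPe z).2 = 5 := by
  simp only [pvGetElemGrPe, List.foldl_cons, List.foldl_nil]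
  rw [step_lt z 0 1 2 (by omega), step_lt z (0+2) (1+1) 8 (by omega),
      step_lt z (0+2+8) (1+1+1) 8 (by omega), step_lt z (0+2+8+8) (1+1+1+1) 18 (by omega),
      step_ge z (0+2+8+8+18) (1+1+1+1+1) 18 (by omega),
      step_ge z (0+2+8+8+18) (1+1+1+1+1) 36 (by omega),
      step_ge z (0+2+8+8+18) (1+1+1+1+1) 36 (by omega)]
  norm_num

theorem gpA6 (z : Int) (h1 : 54 < z) (h2 : z ≤ 90) : (pvGetElemGrPe z).2 = 6 := by
  simp only [pvGetElemGrPe, List.foldl_cons, List.foldl_nil]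
  rw [step_lt z 0 1 2 (by omega), step_lt z (0+2) (1+1) 8 (by omega),
      step_lt z (0+2+8) (1+1+1) 8 (by omega), step_lt z (0+2+8+8) (1+1+1+1) 18 (by omega),
      step_lt z (0+2+8+8+18) (1+1+1+1+1) 18 (by omega),
      step_ge z (0+2+8+8+18+18) (1+1+1+1+1+1) 36 (by omega),
      step_ge z (0+2+8+8+18+18) (1+1+1+1+1+1) 36 (by omega)]
  norm_num

theorem gpA7 (z : Int) (h1 : 90 < z) (h2 : z ≤ 126) : (pvGetElemGrPe z).2 = 7 := by
  simp only [pvGetElemGrPe, List.foldl_cons, List.foldl_nil]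
  rw [step_lt z 0 1 2 (by omega), step_lt z (0+2) (1+1) 8 (by omega),
      step_lt z (0+2+8) (1+1+1) 8 (by omega), step_lt z (0+2+8+8) (1+1+1+1) 18 (by omega),
      step_lt z (0+2+8+8+18) (1+1+1+1+1) 18 (by omega),
      step_lt z (0+2+8+8+18+18) (1+1+1+1+1+1) 36 (by omega),
      step_ge z (0+2+8+8+18+18+36) (1+1+1+1+1+1+1) 36 (by omega)]
  norm_num

-- B's binary search, one lemma per interval (probes at most cum[3], cum[1]/cum[5], cum[0]/cum[2]/cum[4]/cum[6])
theorem bsB1 (z : Int) (h : z ≤ 2) : pvBsLoop z 7 0 7 = 0 := by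
  rw [show pvBsLoop z 7 0 7 = if (36:Int) < z then pvBsLoop z 6 4 7 else pvBsLoop z 6 0 3 from rfl,
      if_neg (by omega : ¬ (36:Int) < z),
      show pvBsLoop z 6 0 3 = if (10:Int) < z then pvBsLoop z 5 2 3 else pvBsLoop z 5 0 1 from rfl,
      if_neg (by omega : ¬ (10:Int) < z),
      show pvBsLoop z 5 0 1 = if (2:Int) < z then pvBsLoop z 4 1 1 else pvBsLoop z 4 0 0 from rfl,
      if_neg (by omega : ¬ (2:Int) < z)]
  rfl

theorem bsB2 (z : Int) (h1 : 2 < z) (h2 : z ≤ 10) : pvBsLoop z 7 0 7 = 1 := by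
  rw [show pvBsLoop z 7 0 7 = if (36:Int) < z then pvBsLoop z 6 4 7 else pvBsLoop z 6 0 3 from rfl,
      if_neg (by omega : ¬ (36:Int) < z),
      show pvBsLoop z 6 0 3 = if (10:Int) < z then pvBsLoop z 5 2 3 else pvBsLoop z 5 0 1 from rfl,
      if_neg (by omega : ¬ (10:Int) < z),
      show pvBsLoop z 5 0 1 = if (2:Int) < z then pvBsLoop z 4 1 1 else pvBsLoop z 4 0 0 from rfl,
      if_pos (by omega : (2:Int) < z)]
  rfl

theorem bsB3 (z : Int) (h1 : 10 < z) (h2 : z ≤ 18) : pvBsLoop z 7 0 7 = 2 := by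
  rw [show pvBsLoop z 7 0 7 = if (36:Int) < z then pvBsLoop z 6 4 7 else pvBsLoop z 6 0 3 from rfl,
      if_neg (by omega : ¬ (36:Int) < z),
      show pvBsLoop z 6 0 3 = if (10:Int) < z then pvBsLoop z 5 2 3 else pvBsLoop z 5 0 1 from rfl,
      if_pos (by omega : (10:Int) < z),
      show pvBsLoop z 5 2 3 = if (18:Int) < z then pvBsLoop z 4 3 3 else pvBsLoop z 4 2 2 from rfl,
      if_neg (by omega : ¬ (18:Int) < z)]
  rfl

theorem bsB4 (z : Int) (h1 : 18 < z) (h2 : z ≤ 36) : pvBsLoop z 7 0 7 = 3 := by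
  rw [show pvBsLoop z 7 0 7 = if (36:Int) < z then pvBsLoop z 6 4 7 else pvBsLoop z 6 0 3 from rfl,
      if_neg (by omega : ¬ (36:Int) < z),
      show pvBsLoop z 6 0 3 = if (10:Int) < z then pvBsLoop z 5 2 3 else pvBsLoop z 5 0 1 from rfl,
      if_pos (by omega : (10:Int) < z),
      show pvBsLoop z 5 2 3 = if (18:Int) < z then pvBsLoop z 4 3 3 else pvBsLoop z 4 2 2 from rfl,
      if_pos (by omega : (18:Int) < z)]
  rfl

theorem bsB5 (z : Int) (h1 : 36 < z) (h2 : z ≤ 54) : pvBsLoop z 7 0 7 = 4 := by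
  rw [show pvBsLoop z 7 0 7 = if (36:Int) < z then pvBsLoop z 6 4 7 else pvBsLoop z 6 0 3 from rfl,
      if_pos (by omega : (36:Int) < z),
      show pvBsLoop z 6 4 7 = if (90:Int) < z then pvBsLoop z 5 6 7 else pvBsLoop z 5 4 5 from rfl,
      if_neg (by omega : ¬ (90:Int) < z),
      show pvBsLoop z 5 4 5 = if (54:Int) < z then pvBsLoop z 4 5 5 else pvBsLoop z 4 4 4 from rfl,
      if_neg (by omega : ¬ (54:Int) < z)]
  rfl

theorem bsB6 (z : Int) (h1 : 54 < z) (h2 : z ≤ 90) : pvBsLoop z 7 0 7 = 5 := by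
  rw [show pvBsLoop z 7 0 7 = if (36:Int) < z then pvBsLoop z 6 4 7 else pvBsLoop z 6 0 3 from rfl,
      if_pos (by omega : (36:Int) < z),
      show pvBsLoop z 6 4 7 = if (90:Int) < z then pvBsLoop z 5 6 7 else pvBsLoop z 5 4 5 from rfl,
      if_neg (by omega : ¬ (90:Int) < z),
      show pvBsLoop z 5 4 5 = if (54:Int) < z then pvBsLoop z 4 5 5 else pvBsLoop z 4 4 4 from rfl,
      if_pos (by omega : (54:Int) < z)]
  rfl

theorem bsB7 (z : Int) (h1 : 90 < z) (h2 : z ≤ 126) : pvBsLoop z 7 0 7 = 6 := by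
  rw [show pvBsLoop z 7 0 7 = if (36:Int) < z then pvBsLoop z 6 4 7 else pvBsLoop z 6 0 3 from rfl,
      if_pos (by omega : (36:Int) < z),
      show pvBsLoop z 6 4 7 = if (90:Int) < z then pvBsLoop z 5 6 7 else pvBsLoop z 5 4 5 from rfl,
      if_pos (by omega : (90:Int) < z),
      show pvBsLoop z 5 6 7 = if (126:Int) < z then pvBsLoop z 4 7 7 else pvBsLoop z 4 6 6 from rfl,
      if_neg (by omega : ¬ (126:Int) < z)]
  rfl

-- ===== VERDICT (by name: the statement is the Claim_ definition above) =====
theorem GetElemCorVal_spec : Claim_equal_GetElemCorVal := by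
  intro z _ hpre
  unfold Spec_GetElemCorVal GetElemCorVal GetElemCorVal_alt
  by_cases k1 : z ≤ 2
  · rw [gpA1 z k1, show pvBsLoop z pvCum.length 0 pvCum.length = 0 from bsB1 z k1]; decide
  · by_cases k2 : z ≤ 10
    · rw [gpA2 z (by omega) k2, show pvBsLoop z pvCum.length 0 pvCum.length = 1 from bsB2 z (by omega) k2]; decide
    · by_cases k3 : z ≤ 18
      · rw [gpA3 z (by omega) k3, show pvBsLoop z pvCum.length 0 pvCum.length = 2 from bsB3 z (by omega) k3]; decide
      · by_cases k4 : z ≤ 36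
        · rw [gpA4 z (by omega) k4, show pvBsLoop z pvCum.length 0 pvCum.length = 3 from bsB4 z (by omega) k4]; decide
        · by_cases k5 : z ≤ 54
          · rw [gpA5 z (by omega) k5, show pvBsLoop z pvCum.length 0 pvCum.length = 4 from bsB5 z (by omega) k5]; decide
          · by_cases k6 : z ≤ 90
            · rw [gpA6 z (by omega) k6, show pvBsLoop z pvCum.length 0 pvCum.length = 5 from bsB6 z (by omega) k6]; decide
            · have h90 : (90:Int) < z := by omega
              have h126 : z ≤ 126 := hpre
              rw [gpA7 z h90 h126, show pvBsLoop z pvCum.length 0 pvCum.length = 6 from bsB7 z h90 h126]; decide
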